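-- pv_equiv track=rewrite | github.com/Prsmiami/Client-Server-Networking | Client server python files/Checkers Files/CheckersClient.py | inbounds
-- ===== SOURCE A (Python) =====
-- def inbounds(move):
--     rows="ABCDEFGH"
--     cols="12345678"
--     startindex=0
--     destindex=0
--     m0 = False
--     m1 = False
--     m2 = False
--     m3 = False
--     total = False
--     for i in range(8):
--         if(move[0] == rows[i]):
--             startindex += 8*(i)
--             m0 = True
--         if(move[1] == cols[i]):
--             startindex += (i)
--             m1 = True
--         if(move[2] == rows[i]):
--             destindex += 8*(i)
--             m2 = True
--         if(move[3] == cols[i]):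
--             destindex += (i)
--             m3 = True
--     total = m0 and m1 and m2 and m3
--     valid = total
--     return valid
-- ===== SOURCE B (Python) =====
-- def inbounds(move):
--     a, b, c, d = move[0], move[1], move[2], move[3]
--     def on_board(ch, base):
--         return 0 <= ord(ch) - base < 8
--     return (on_board(a, 65) and on_board(b, 49)
--             and on_board(c, 65) and on_board(d, 49))
-- ===== Notes on version B (the rewrite author's own statement) =====
-- stated objective: simpler
-- what changed: Replaced the 8-iteration scan (with its dead start/dest index arithmetic and flag accumulators) by binding the four characters and testing each with an arithmetic range check on its character code (ord(ch)-base in [0,8)), valid because the row and column alphabets are contiguous code ranges.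
import Mathlib
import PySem

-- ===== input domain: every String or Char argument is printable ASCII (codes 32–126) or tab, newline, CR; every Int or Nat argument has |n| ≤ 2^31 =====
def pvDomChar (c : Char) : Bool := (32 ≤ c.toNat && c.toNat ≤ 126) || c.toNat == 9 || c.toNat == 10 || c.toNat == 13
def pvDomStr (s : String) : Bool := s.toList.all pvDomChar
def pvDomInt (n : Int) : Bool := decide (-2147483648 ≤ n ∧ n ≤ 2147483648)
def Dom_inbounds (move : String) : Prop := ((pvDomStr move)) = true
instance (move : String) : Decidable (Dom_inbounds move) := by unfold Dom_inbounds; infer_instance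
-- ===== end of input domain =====

-- B is simpler: it binds the four characters and validates each with an arithmetic
-- range check on its character code (ord(ch)-base in [0,8)), correct because the row
-- and column alphabets are contiguous code ranges; A's 8-iteration scan with its dead
-- start/dest index arithmetic is dropped. Equivalence is claimed on Pre_ (length ≥ 4);
-- on shorter strings both Pythons raise IndexError.

-- ===== PORT A =====
-- one iteration of A's loop body: the four ifs, updating (startindex, destindex, m0, m1, m2, m3)
def stepA (c0 c1 c2 c3 : Char) (st : Int × Int × Bool × Bool × Bool × Bool) (i : Nat) :
    Int × Int × Bool × Bool × Bool × Bool :=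
  let (si, di, m0, m1, m2, m3) := st
  let si := if c0 == "ABCDEFGH".toList.getD i ' ' then si + 8*(i:Int) else si
  let m0 := if c0 == "ABCDEFGH".toList.getD i ' ' then true else m0
  let si := if c1 == "12345678".toList.getD i ' ' then si + (i:Int) else si
  let m1 := if c1 == "12345678".toList.getD i ' ' then true else m1
  let di := if c2 == "ABCDEFGH".toList.getD i ' ' then di + 8*(i:Int) else di
  let m2 := if c2 == "ABCDEFGH".toList.getD i ' ' then true else m2
  let di := if c3 == "12345678".toList.getD i ' ' then di + (i:Int) else di
  let m3 := if c3 == "12345678".toList.getD i ' ' then true else m3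
  (si, di, m0, m1, m2, m3)

-- literal port of A: the for-loop over range(8); move[0..3] are bound by the match
-- (strings shorter than 4 raise IndexError in Python, outside Pre_).
def inbounds (move : String) : Bool :=
  match move.toList with
  | c0 :: c1 :: c2 :: c3 :: _ =>
    let r := (List.range 8).foldl (stepA c0 c1 c2 c3) ((0:Int), (0:Int), false, false, false, false)
    r.2.2.1 && r.2.2.2.1 && r.2.2.2.2.1 && r.2.2.2.2.2
  | _ => false

-- ===== PORT B =====
-- B's helper on_board(ch, base): 0 <= ord(ch) - base < 8, over Int like Python's int
def onBoard (ch : Char) (base : Int) : Bool :=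
  0 ≤ (ch.toNat : Int) - base && (ch.toNat : Int) - base < 8

def inbounds_alt (move : String) : Bool :=
  match PySem.List.pyGet? move.toList 0, PySem.List.pyGet? move.toList 1,
        PySem.List.pyGet? move.toList 2, PySem.List.pyGet? move.toList 3 with
  | some a, some b, some c, some d =>
    onBoard a 65 && onBoard b 49 && onBoard c 65 && onBoard d 49
  | _, _, _, _ => false  -- move[0..3] raises IndexError in Python (outside Pre_)

-- ===== PRECONDITION & SPEC =====
-- Pre_ excludes strings of length < 4, on which Python A raises IndexError at move[0..3]
def Pre_inbounds (move : String) : Prop := 4 ≤ move.toList.length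
instance (move : String) : Decidable (Pre_inbounds move) := by unfold Pre_inbounds; infer_instance
def pvWitness_inbounds : String := "A1B2"

def Spec_inbounds (move : String) (out : Bool) : Prop := out = inbounds_alt move
instance (move : String) (out : Bool) : Decidable (Spec_inbounds move out) := by unfold Spec_inbounds; infer_instance

-- ===== CLAIM (what is proved, stated in full; the proofs are below) =====
def Claim_equal_inbounds : Prop := ∀ (move : String), Dom_inbounds move → Pre_inbounds move → Spec_inbounds move (inbounds move)

-- ===== LEMMAS AND PROOFS =====
theorem pv_range8 : List.range 8 = [0,1,2,3,4,5,6,7] := by decide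
theorem pv_ite (b m : Bool) : (if b = true then true else m) = (b || m) := by cases b <;> simp

-- the flag components of A's loop ignore the (dead) index accumulators
theorem foldA_flags (c0 c1 c2 c3 : Char) (l : List Nat) :
    ∀ (si di : Int) (m0 m1 m2 m3 : Bool),
    (l.foldl (stepA c0 c1 c2 c3) (si, di, m0, m1, m2, m3)).2.2 =
      (m0 || l.any (fun i => c0 == "ABCDEFGH".toList.getD i ' '),
       m1 || l.any (fun i => c1 == "12345678".toList.getD i ' '),
       m2 || l.any (fun i => c2 == "ABCDEFGH".toList.getD i ' '),
       m3 || l.any (fun i => c3 == "12345678".toList.getD i ' ')) := by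
  induction l with
  | nil => intro si di m0 m1 m2 m3; simp
  | cons i t ih =>
    intro si di m0 m1 m2 m3
    simp only [List.foldl_cons, stepA, pv_ite, List.any_cons, ih]
    simp only [Prod.mk.injEq]
    refine ⟨?_, ?_, ?_, ?_⟩
    · cases m0 <;> cases c0 == "ABCDEFGH".toList.getD i ' ' <;> simp
    · cases m1 <;> cases c1 == "12345678".toList.getD i ' ' <;> simp
    · cases m2 <;> cases c2 == "ABCDEFGH".toList.getD i ' ' <;> simp
    · cases m3 <;> cases c3 == "12345678".toList.getD i ' ' <;> simp

theorem pv_char_eq (c d : Char) : (c == d) = decide (c.toNat = d.toNat) := by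
  rw [Bool.eq_iff_iff]
  simp only [beq_iff_eq, decide_eq_true_eq]
  exact ⟨fun h => by rw [h], fun h => Char.ext (UInt32.toNat_inj.mp h)⟩

-- A's scan for a row letter equals B's arithmetic range check (codes 65..72 are contiguous)
theorem pv_any_rows (c : Char) :
    ((List.range 8).any (fun i => c == "ABCDEFGH".toList.getD i ' ')) = onBoard c 65 := by
  rw [Bool.eq_iff_iff]
  simp only [pv_range8, onBoard, List.any_cons, List.any_nil, Bool.or_eq_true,
    Bool.and_eq_true, decide_eq_true_eq, pv_char_eq]
  constructor
  · rintro (h|h|h|h|h|h|h|(h|h)) <;> simp_all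
  · rintro ⟨h1, h2⟩
    have : c.toNat = 65 ∨ c.toNat = 66 ∨ c.toNat = 67 ∨ c.toNat = 68 ∨ c.toNat = 69 ∨
        c.toNat = 70 ∨ c.toNat = 71 ∨ c.toNat = 72 := by omega
    rcases this with h|h|h|h|h|h|h|h <;> simp [h]

-- A's scan for a column digit equals B's arithmetic range check (codes 49..56 are contiguous)
theorem pv_any_cols (c : Char) :
    ((List.range 8).any (fun i => c == "12345678".toList.getD i ' ')) = onBoard c 49 := by
  rw [Bool.eq_iff_iff]
  simp only [pv_range8, onBoard, List.any_cons, List.any_nil, Bool.or_eq_true,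
    Bool.and_eq_true, decide_eq_true_eq, pv_char_eq]
  constructor
  · rintro (h|h|h|h|h|h|h|(h|h)) <;> simp_all
  · rintro ⟨h1, h2⟩
    have : c.toNat = 49 ∨ c.toNat = 50 ∨ c.toNat = 51 ∨ c.toNat = 52 ∨ c.toNat = 53 ∨
        c.toNat = 54 ∨ c.toNat = 55 ∨ c.toNat = 56 := by omega
    rcases this with h|h|h|h|h|h|h|h <;> simp [h]

-- ===== VERDICT (by name: the statement is the Claim_ definition above) =====
theorem inbounds_spec : Claim_equal_inbounds := by
  intro move _ _
  unfold Spec_inbounds inbounds inbounds_alt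
  cases hm : move.toList with
  | nil => rfl
  | cons c0 t0 =>
    cases t0 with
    | nil => rfl
    | cons c1 t1 =>
      cases t1 with
      | nil => rfl
      | cons c2 t2 =>
        cases t2 with
        | nil => rfl
        | cons c3 t3 =>
          have h := foldA_flags c0 c1 c2 c3 (List.range 8) 0 0 false false false false
          simp only [pv_any_rows, pv_any_cols, Bool.false_or] at h
          simp only [h]
          simp only [PySem.List.pyGet?, PySem.List.pyIdx?]
          split_ifs with h1 h2 h3 h4
          · simp
          all_goals (exfalso; simp only [List.length_cons] at *; omega)
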